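-- pv_equiv track=rewrite | github.com/hemanthshinoda2-dotcom/Tankoban-Max | projectbutterfly/QTRoute/src/common.py | sanitize_ignore
-- ===== SOURCE A (Python) =====
-- def sanitize_ignore(patterns, max_count: int = 200):
--     if not isinstance(patterns, list):
--         return []
--     seen = set()
--     out = []
--     for p in patterns:
--         s = str(p or "").strip().lower()
--         if not s or s in seen:
--             continue
--         seen.add(s)
--         out.append(s)
--         if len(out) >= max_count:
--             break
--     return out
-- ===== SOURCE B (Python) =====
-- def sanitize_ignore(patterns, max_count: int = 200):
--     if not isinstance(patterns, list):
--         return []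
--     norm = [str(p or "").strip().lower() for p in patterns]
--     out = [s for i, s in enumerate(norm) if s and s not in norm[:i]]
--     return out[:max_count] if max_count > 0 else []
-- ===== Notes on version B (the rewrite author's own statement) =====
-- stated objective: alternative
-- what changed: Replaces the fused loop with a seen-set and early break by staged passes: normalize everything, keep an element iff it is non-empty and its first occurrence (tested by membership in the prefix of the normalized list, no auxiliary set), then slice to the cap.
-- intended difference: When max_count <= 0 and some pattern strips to a non-empty string, A returns a one-element list (the first normalized pattern) because it only checks the cap after appending, while B returns an empty list, the intended meaning of a non-positive cap. — e.g. on sanitize_ignore(["A "], 0): A returns ["a"], B returns []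
import Mathlib
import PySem

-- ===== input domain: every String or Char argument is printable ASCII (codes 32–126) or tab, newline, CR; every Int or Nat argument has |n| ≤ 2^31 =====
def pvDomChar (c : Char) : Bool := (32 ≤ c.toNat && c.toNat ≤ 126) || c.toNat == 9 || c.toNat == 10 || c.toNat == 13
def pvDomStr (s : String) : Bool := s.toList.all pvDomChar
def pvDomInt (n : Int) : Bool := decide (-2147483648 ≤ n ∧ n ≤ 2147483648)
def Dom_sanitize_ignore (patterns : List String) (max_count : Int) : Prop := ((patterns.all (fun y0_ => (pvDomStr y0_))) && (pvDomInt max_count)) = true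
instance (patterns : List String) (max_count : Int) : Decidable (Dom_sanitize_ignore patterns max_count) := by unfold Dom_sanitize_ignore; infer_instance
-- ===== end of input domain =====

-- B drops A's fused loop with seen-set and early break for staged passes: normalize all,
-- keep first occurrences by prefix membership (no auxiliary set), slice to the cap.
-- Return values only; no argument is mutated.

-- ===== PORT A =====
-- s = str(p or "").strip().lower()   (p is a string, so 'p or ""' is p unless p == "")
def pvNorm (p : String) : String :=
  PySem.Str.lower (PySem.Str.strip (if p = "" then "" else p))

-- the for-loop with 'seen', 'out' and the early break
def pvLoopA : List String → PySem.Set String → List String → Int → List String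
  | [], _, out, _ => out
  | p :: rest, seen, out, m =>
    let s := pvNorm p
    if s = "" || PySem.Set.contains seen s then
      pvLoopA rest seen out m
    else
      let out' := out ++ [s]
      if m ≤ (out'.length : Int) then out' else pvLoopA rest (PySem.Set.add seen s) out' m

def sanitize_ignore (patterns : List String) (max_count : Int) : List String :=
  pvLoopA patterns PySem.Set.empty [] max_count

-- ===== PORT B =====
-- norm = [str(p or "").strip().lower() for p in patterns]
-- out  = [s for i, s in enumerate(norm) if s and s not in norm[:i]]
-- return out[:max_count] if max_count > 0 else []
def sanitize_ignore_alt (patterns : List String) (max_count : Int) : List String :=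
  let norm := patterns.map pvNorm
  let out := ((PySem.List.enumerate norm 0).filter
      (fun q => q.2 != "" && !((PySem.List.slice norm none (some q.1)).contains q.2))).map
      (fun q => q.2)
  if 0 < max_count then PySem.List.slice out none (some max_count) else []

-- ===== PRECONDITION & SPEC =====
-- When max_count ≤ 0 and some pattern strips to a non-empty string, A returns a one-element
-- list (the first normalized pattern) because it checks the cap only after appending, while
-- B returns an empty list, the intended meaning of a non-positive cap.
def D_sanitize_ignore (patterns : List String) (max_count : Int) : Prop :=
  max_count ≤ 0 ∧ ∃ p ∈ patterns, PySem.Str.strip p ≠ ""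
instance (patterns : List String) (max_count : Int) : Decidable (D_sanitize_ignore patterns max_count) := by
  unfold D_sanitize_ignore; infer_instance

def Spec_sanitize_ignore (patterns : List String) (max_count : Int) (out : List String) : Prop :=
  ¬ D_sanitize_ignore patterns max_count → out = sanitize_ignore_alt patterns max_count
instance (patterns : List String) (max_count : Int) (out : List String) : Decidable (Spec_sanitize_ignore patterns max_count out) := by
  unfold Spec_sanitize_ignore; infer_instance

def pvDiffWitness_sanitize_ignore : List String × Int := (["A "], 0)
def pvDiffWitnessOut_sanitize_ignore : (List String) × (List String) := (["a"], [])

-- ===== CLAIM (what is proved, stated in full; the proofs are below) =====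
def Claim_unchanged_sanitize_ignore : Prop := ∀ (patterns : List String) (max_count : Int), Dom_sanitize_ignore patterns max_count → Spec_sanitize_ignore patterns max_count (sanitize_ignore patterns max_count)
def Claim_changed_sanitize_ignore : Prop := Dom_sanitize_ignore (pvDiffWitness_sanitize_ignore.1) (pvDiffWitness_sanitize_ignore.2) ∧ D_sanitize_ignore (pvDiffWitness_sanitize_ignore.1) (pvDiffWitness_sanitize_ignore.2) ∧ sanitize_ignore (pvDiffWitness_sanitize_ignore.1) (pvDiffWitness_sanitize_ignore.2) = pvDiffWitnessOut_sanitize_ignore.1 ∧ sanitize_ignore_alt (pvDiffWitness_sanitize_ignore.1) (pvDiffWitness_sanitize_ignore.2) = pvDiffWitnessOut_sanitize_ignore.2 ∧ pvDiffWitnessOut_sanitize_ignore.1 ≠ pvDiffWitnessOut_sanitize_ignore.2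
def Claim_exact_sanitize_ignore : Prop := ∀ (patterns : List String) (max_count : Int), Dom_sanitize_ignore patterns max_count → D_sanitize_ignore patterns max_count → sanitize_ignore patterns max_count ≠ sanitize_ignore_alt patterns max_count

-- ===== LEMMAS AND PROOFS =====

-- order-preserving dedup of the non-empty normalized items, relative to 'seen'
def pvDdp : List String → List String → List String
  | [], _ => []
  | p :: rest, seen =>
    let s := pvNorm p
    if s = "" || PySem.Set.contains seen s then pvDdp rest seen
    else s :: pvDdp rest (seen ++ [s])

theorem pvNorm_eq (p : String) : pvNorm p = PySem.Str.lower (PySem.Str.strip p) := by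
  unfold pvNorm; split <;> simp_all

theorem pvNorm_empty {p : String} (h : PySem.Str.strip p = "") : pvNorm p = "" := by
  rw [pvNorm_eq, h]; rfl

theorem pvNorm_ne_empty {p : String} (h : PySem.Str.strip p ≠ "") : pvNorm p ≠ "" := by
  rw [pvNorm_eq]
  intro hc
  apply h
  have h2 := congrArg String.toList hc
  rw [PySem.Str.toList_lower] at h2
  simp only [PySem.Chars.lower] at h2
  simp at h2
  exact String.toList_eq_nil_iff.mp (by simpa using h2)

theorem pvLoopA_eq (l : List String) (seen out : List String) (m : Int)
    (h : (out.length : Int) < m) :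
    pvLoopA l seen out m = out ++ (pvDdp l seen).take (m - out.length).toNat := by
  induction l generalizing seen out with
  | nil => simp [pvLoopA, pvDdp]
  | cons p rest ih =>
    simp only [pvLoopA, pvDdp]
    by_cases hc : (decide (pvNorm p = "") || PySem.Set.contains seen (pvNorm p)) = true
    · rw [if_pos hc, if_pos hc]; exact ih seen out h
    · rw [if_neg hc, if_neg hc]
      simp only [Bool.or_eq_true, decide_eq_true_eq, not_or] at hc
      have hadd : PySem.Set.add seen (pvNorm p) = seen ++ [pvNorm p] := by
        simp only [PySem.Set.add]
        rw [if_neg hc.2]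
      have htk : (m - (out.length : Int)).toNat = ((m - ((out.length : Int) + 1)).toNat) + 1 := by omega
      rw [htk, List.take_succ_cons]
      by_cases hb : m ≤ ((out ++ [pvNorm p]).length : Int)
      · rw [if_pos hb]
        simp only [List.length_append, List.length_cons, List.length_nil] at hb
        have : (m - ((out.length : Int) + 1)).toNat = 0 := by push_cast at hb; omega
        simp [this]
      · rw [if_neg hb]
        simp only [List.length_append, List.length_cons, List.length_nil] at hb
        have hlt : (((out ++ [pvNorm p]).length : Int)) < m := by simp; push_cast at hb ⊢; omega
        rw [ih (PySem.Set.add seen (pvNorm p)) _ hlt, hadd]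
        have : ((out ++ [pvNorm p]).length : Int) = (out.length : Int) + 1 := by simp
        rw [this]
        simp

-- B's prefix-membership scan equals the seen-relative dedup, under the invariant that
-- 'seen' holds exactly the non-empty strings occurring among the already-scanned norms.
theorem pvB_eq (suf : List String) (pre seen : List String)
    (hinv : ∀ s, s ≠ "" → (s ∈ seen ↔ s ∈ pre.map pvNorm)) :
    ((PySem.List.enumerate (suf.map pvNorm) (pre.length : Int)).filter
      (fun q => q.2 != "" &&
        !((PySem.List.slice ((pre ++ suf).map pvNorm) none (some q.1)).contains q.2))).map
      (fun q => q.2)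
    = pvDdp suf seen := by
  induction suf generalizing pre seen with
  | nil => simp [pvDdp]
  | cons p rest ih =>
    rw [List.map_cons, PySem.List.enumerate_cons, List.filter_cons]
    have hsl : PySem.List.slice ((pre ++ p :: rest).map pvNorm) none (some (pre.length : Int))
        = pre.map pvNorm := by
      rw [PySem.List.slice_to _ (by positivity)]
      simp [List.map_append]
    simp only [pvDdp, hsl]
    by_cases h0 : pvNorm p = ""
    · have hg : (decide (pvNorm p = "") || PySem.Set.contains seen (pvNorm p)) = true := by
        simp [h0]
      rw [if_pos hg]
      have hpred : ((pvNorm p != "") &&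
          !((pre.map pvNorm).contains (pvNorm p))) = false := by simp [h0]
      rw [if_neg (by simp [h0])]
      have hstep := ih (pre ++ [p]) seen (by
        intro s hs
        rw [hinv s hs]
        simp only [List.map_append, List.mem_append, List.map_cons, List.map_nil,
          List.mem_singleton]
        constructor
        · intro h; exact Or.inl h
        · rintro (h | h)
          · exact h
          · exact absurd (h.trans h0) hs)
      have hlen : ((pre ++ [p]).length : Int) = (pre.length : Int) + 1 := by simp
      simp only [List.append_assoc, List.singleton_append, hlen] at hstep
      exact hstep
    · by_cases hmem : pvNorm p ∈ pre.map pvNorm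
      · have hseen : pvNorm p ∈ seen := (hinv _ h0).mpr hmem
        have hg : (decide (pvNorm p = "") || PySem.Set.contains seen (pvNorm p)) = true := by
          simp [PySem.Set.contains, hseen]
        rw [if_pos hg]
        rw [if_neg (by simp [hmem])]
        have hstep := ih (pre ++ [p]) seen (by
          intro s hs
          rw [hinv s hs]
          simp only [List.map_append, List.mem_append, List.map_cons, List.map_nil,
            List.mem_singleton]
          constructor
          · intro h; exact Or.inl h
          · rintro (h | h)
            · exact h
            · rw [h]; exact hmem)
        have hlen : ((pre ++ [p]).length : Int) = (pre.length  : Int) + 1 := by simp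
        simp only [List.append_assoc, List.singleton_append, hlen] at hstep
        exact hstep
      · have hseen : pvNorm p ∉ seen := fun h => hmem ((hinv _ h0).mp h)
        have hg : ¬ (decide (pvNorm p = "") || PySem.Set.contains seen (pvNorm p)) = true := by
          simp [PySem.Set.contains, h0, hseen]
        rw [if_neg hg]
        rw [if_pos (by simp [h0, hmem])]
        rw [List.map_cons]
        have hstep := ih (pre ++ [p]) (seen ++ [pvNorm p]) (by
          intro s hs
          simp only [List.mem_append, List.mem_singleton, List.map_append, List.map_cons,
            List.map_nil]
          rw [hinv s hs])
        have hlen : ((pre ++ [p]).length : Int) = (pre.length : Int) + 1 := by simp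
        simp only [List.append_assoc, List.singleton_append, hlen] at hstep
        simpa using hstep

theorem pvOut_eq (patterns : List String) :
    ((PySem.List.enumerate (patterns.map pvNorm) 0).filter
      (fun q => q.2 != "" &&
        !((PySem.List.slice (patterns.map pvNorm) none (some q.1)).contains q.2))).map
      (fun q => q.2)
    = pvDdp patterns [] := by
  have h := pvB_eq patterns [] [] (by simp)
  simpa using h

theorem pvLoopA_skip (l : List String) (seen out : List String) (m : Int)
    (h : ∀ p ∈ l, pvNorm p = "") : pvLoopA l seen out m = out := by
  induction l with
  | nil => rfl
  | cons p rest ih =>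
    have hp : pvNorm p = "" := h p (by simp)
    simp only [pvLoopA]
    rw [if_pos (by simp [hp])]
    exact ih (fun q hq => h q (by simp [hq]))

theorem pvLoopA_ne_nil (l : List String) (seen : List String) (m : Int)
    (hm : m ≤ 0)
    (h : ∃ p ∈ l, pvNorm p ≠ "" ∧ PySem.Set.contains seen (pvNorm p) = false) :
    pvLoopA l seen [] m ≠ [] := by
  induction l with
  | nil => simp at h
  | cons p rest ih =>
    obtain ⟨q, hq, hq1, hq2⟩ := h
    simp only [pvLoopA]
    by_cases hc : (decide (pvNorm p = "") || PySem.Set.contains seen (pvNorm p)) = true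
    · rw [if_pos hc]
      rcases List.mem_cons.mp hq with he | he
      · subst he
        simp only [Bool.or_eq_true, decide_eq_true_eq] at hc
        rcases hc with h1 | h1
        · exact absurd h1 hq1
        · rw [hq2] at h1; cases h1
      · exact ih ⟨q, he, hq1, hq2⟩
    · rw [if_neg hc]
      rw [if_pos (by simp; omega)]
      simp

-- ===== VERDICT (by name: the statement is the Claim_ definition above) =====
theorem sanitize_ignore_spec : Claim_unchanged_sanitize_ignore := by
  intro patterns m _dom
  unfold Spec_sanitize_ignore
  intro hnd
  show pvLoopA patterns [] [] m =
      sanitize_ignore_alt patterns m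
  unfold sanitize_ignore_alt
  simp only [pvOut_eq]
  by_cases hm : 0 < m
  · rw [if_pos hm, PySem.List.slice_to _ (le_of_lt hm),
      pvLoopA_eq patterns [] [] m (by simpa using hm)]
    simp
  · unfold D_sanitize_ignore at hnd
    rw [if_neg hm]
    refine pvLoopA_skip _ _ _ _ (fun p hp => pvNorm_empty ?_)
    by_contra hs
    exact hnd ⟨by omega, p, hp, hs⟩

theorem sanitize_ignore_changed : Claim_changed_sanitize_ignore := by
  unfold Claim_changed_sanitize_ignore; decide

theorem sanitize_ignore_tight : Claim_exact_sanitize_ignore := by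
  intro patterns m _dom hd
  obtain ⟨hm, q, hq, hqs⟩ := hd
  unfold sanitize_ignore sanitize_ignore_alt
  have hB : ¬ (0 < m) := by omega
  simp only [hB, if_false]
  exact pvLoopA_ne_nil patterns PySem.Set.empty m hm
    ⟨q, hq, pvNorm_ne_empty hqs, rfl⟩
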